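-- pv_equiv track=rewrite | github.com/Taitilchheda/Cortex | server/agents/orchestrator.py | _support_roles_for
-- ===== SOURCE A (Python) =====
-- from typing import AsyncGenerator, Dict, Any, List, Optional, Tuple
--
-- def _support_roles_for(primary_role: str, task: str) -> List[str]:
--     """Select up to two supporting specialists for cross-checking."""
--     text = (task or "").lower()
--     support: List[str] = []
--
--     if primary_role == "coder":
--         if any(k in text for k in ["error", "bug", "fix", "exception", "failing"]):
--             support.extend(["debug", "review"])
--         elif any(k in text for k in ["architecture", "design", "migration", "scalable", "refactor"]):
--             support.extend(["architect", "review"])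
--     elif primary_role == "architect":
--         support.append("review")
--     elif primary_role == "debug":
--         support.append("review")
--     elif primary_role == "review":
--         if any(k in text for k in ["security", "vulnerability", "owasp"]):
--             support.append("debug")
--
--     out: List[str] = []
--     for role in support:
--         if role != primary_role and role not in out:
--             out.append(role)
--     return out[:2]
-- ===== SOURCE B (Python) =====
-- from typing import List
--
-- def _support_roles_for(primary_role: str, task: str) -> List[str]:
--     """Select up to two supporting specialists for cross-checking.
--
--     Role-centric formulation: instead of branching on the primary role,
--     each candidate supporting role has its own inclusion predicate, and the
--     result is the fixed priority order (debug, architect, review) filtered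
--     by those predicates.
--     """
--     text = (task or "").lower()
--     err = any(k in text for k in ["error", "bug", "fix", "exception", "failing"])
--     arch = any(k in text for k in ["architecture", "design", "migration", "scalable", "refactor"])
--     sec = any(k in text for k in ["security", "vulnerability", "owasp"])
--     include = {
--         "debug": (primary_role == "coder" and err) or (primary_role == "review" and sec),
--         "architect": primary_role == "coder" and not err and arch,
--         "review": (primary_role == "coder" and (err or arch)) or primary_role in ("architect", "debug"),
--     }
--     return [r for r in ("debug", "architect", "review") if include[r]]
-- ===== Notes on version B (the rewrite author's own statement) =====
-- stated objective: alternative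
-- what changed: Inverted the decomposition: instead of A's if/elif cascade on the primary role building a support list then deduping, B gives each candidate supporting role (debug, architect, review) its own inclusion predicate over (primary_role, keyword flags) and filters a fixed priority order by them.
import Mathlib
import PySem

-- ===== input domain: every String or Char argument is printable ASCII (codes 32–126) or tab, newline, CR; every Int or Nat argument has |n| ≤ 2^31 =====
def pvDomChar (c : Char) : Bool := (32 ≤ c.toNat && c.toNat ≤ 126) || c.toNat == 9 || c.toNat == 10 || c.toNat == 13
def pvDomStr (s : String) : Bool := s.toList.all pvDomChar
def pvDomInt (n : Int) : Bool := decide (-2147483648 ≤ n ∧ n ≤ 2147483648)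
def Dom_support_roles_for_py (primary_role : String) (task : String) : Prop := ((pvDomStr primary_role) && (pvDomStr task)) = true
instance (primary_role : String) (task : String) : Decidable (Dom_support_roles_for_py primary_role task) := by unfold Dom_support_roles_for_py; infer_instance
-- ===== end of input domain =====

-- B inverts A's decomposition: per-candidate inclusion predicates filtering a fixed priority order, instead of a primary-role cascade plus dedup pass (alternative, same cost).

-- Python's 'any(k in text for k in kws)', used by both ports (exact: PySem.Str.isIn is Python's 'in' on strings)
def pvHasAny (kws : List String) (text : String) : Bool := kws.any (fun k => PySem.Str.isIn k text)

-- ===== PORT A =====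
def support_roles_for_py (primary_role : String) (task : String) : List String :=
  let text := PySem.Str.lower (if task = "" then "" else task)
  let support : List String :=
    if primary_role = "coder" then
      if pvHasAny ["error", "bug", "fix", "exception", "failing"] text then
        ["debug", "review"]
      else if pvHasAny ["architecture", "design", "migration", "scalable", "refactor"] text then
        ["architect", "review"]
      else []
    else if primary_role = "architect" then ["review"]
    else if primary_role = "debug" then ["review"]
    else if primary_role = "review" then
      if pvHasAny ["security", "vulnerability", "owasp"] text then ["debug"] else []
    else []
  let out : List String :=
    support.foldl (fun out role => if role ≠ primary_role ∧ role ∉ out then out ++ [role] else out) []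
  out.take 2

-- ===== PORT B =====
-- Source B's inclusion predicate for one candidate role (the 'include' dict entries)
def pvInclude (primary_role : String) (err arch sec : Bool) (r : String) : Bool :=
  if r = "debug" then (primary_role = "coder" && err) || (primary_role = "review" && sec)
  else if r = "architect" then primary_role = "coder" && !err && arch
  else if r = "review" then (primary_role = "coder" && (err || arch)) || primary_role = "architect" || primary_role = "debug"
  else false

def support_roles_for_py_alt (primary_role : String) (task : String) : List String :=
  let text := PySem.Str.lower (if task = "" then "" else task)
  let err := pvHasAny ["error", "bug", "fix", "exception", "failing"] text
  let arch := pvHasAny ["architecture", "design", "migration", "scalable", "refactor"] text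
  let sec := pvHasAny ["security", "vulnerability", "owasp"] text
  (["debug", "architect", "review"]).filter (pvInclude primary_role err arch sec)

-- ===== PRECONDITION & SPEC =====
def Spec_support_roles_for_py (primary_role : String) (task : String) (out : List String) : Prop := out = support_roles_for_py_alt primary_role task
instance (primary_role : String) (task : String) (out : List String) : Decidable (Spec_support_roles_for_py primary_role task out) := by unfold Spec_support_roles_for_py; infer_instance

-- ===== CLAIM (what is proved, stated in full; the proofs are below) =====
def Claim_equal_support_roles_for_py : Prop := ∀ (primary_role : String) (task : String), Dom_support_roles_for_py primary_role task → Spec_support_roles_for_py primary_role task (support_roles_for_py primary_role task)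

-- ===== LEMMAS AND PROOFS =====

-- ===== VERDICT (by name: the statement is the Claim_ definition above) =====
theorem support_roles_for_py_spec : Claim_equal_support_roles_for_py := by
  intro p t _
  unfold Spec_support_roles_for_py support_roles_for_py support_roles_for_py_alt
  set text := PySem.Str.lower (if t = "" then "" else t) with htext
  clear htext
  by_cases h1 : p = "coder"
  · subst h1
    cases he : pvHasAny ["error", "bug", "fix", "exception", "failing"] text <;>
      cases ha : pvHasAny ["architecture", "design", "migration", "scalable", "refactor"] text <;>
      simp [he, ha, pvInclude, List.filter]
  · by_cases h2 : p = "architect"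
    · subst h2; simp [pvInclude, List.filter]
    · by_cases h3 : p = "debug"
      · subst h3; simp [pvInclude, List.filter]
      · by_cases h4 : p = "review"
        · subst h4
          cases hs : pvHasAny ["security", "vulnerability", "owasp"] text <;>
            simp [hs, pvInclude, List.filter]
        · simp [h1, h2, h3, h4, pvInclude, List.filter]
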